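-- pv_equiv track=rewrite | github.com/lfforai/zd_project | .idea/spark-warehouse/sample/sample.py | fuc
-- ===== SOURCE A (Python) =====
-- def fuc(iterator):
--     value_list=[]
--     for a in iterator:
--         for j in range(str(a).__len__()):
--             len=str(a).__len__()
--             if j>0 and j<len-3:
--                 if  a[j].isdigit() and (a[j+1].__eq__("F") or a[j+1].__eq__("N")) \
--                         and  (a[j+2].__eq__("W") or a[j+2].__eq__("Q") or a[j+2].__eq__("S")):
--                         index2=str(a).find("_",2)
--                         value_list.append([a[0:j+1],a[0:index2]+"|"+a[0:j+1]+"|"+str(a)])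
--     return value_list
-- ===== SOURCE B (Python) =====
-- def fuc(iterator):
--     value_list = []
--     for a in iterator:
--         s = str(a)
--         n = len(s)
--         index2 = s.find("_", 2)
--         p = 0
--         while p + 1 < n:
--             if s[p] in "FN" and s[p + 1] in "WQS":
--                 if p >= 2 and p + 3 <= n and s[p - 1].isdigit():
--                     head = s[:p]
--                     value_list.append([head, s[:index2] + "|" + head + "|" + s])
--                 p += 2
--             else:
--                 p += 1
--     return value_list
-- ===== Notes on version B (the rewrite author's own statement) =====
-- stated objective: alternative
-- what changed: Replaces the per-index loop (which re-derives len, str(a) and find per position) with a match-driven scanner that advances two positions past each [FN][WQS] occurrence and precomputes len and find('_',2) once per string.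
import Mathlib
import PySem

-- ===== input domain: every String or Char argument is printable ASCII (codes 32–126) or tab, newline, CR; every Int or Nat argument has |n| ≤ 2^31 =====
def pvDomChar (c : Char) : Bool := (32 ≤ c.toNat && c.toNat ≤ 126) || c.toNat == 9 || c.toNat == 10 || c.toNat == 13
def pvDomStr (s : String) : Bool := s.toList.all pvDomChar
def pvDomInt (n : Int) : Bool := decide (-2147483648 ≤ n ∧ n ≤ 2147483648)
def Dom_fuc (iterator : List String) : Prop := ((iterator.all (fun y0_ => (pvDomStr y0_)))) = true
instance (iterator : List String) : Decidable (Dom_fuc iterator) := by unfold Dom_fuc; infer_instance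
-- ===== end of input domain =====

-- B replaces A's per-index loop by a match-driven scanner (skip 2 past each [FN][WQS] hit,
-- len and find('_',2) computed once per string); alternative decomposition, same asymptotic cost.

-- ===== PORT A =====
def pvIsFN (c : Char) : Bool := c == 'F' || c == 'N'
def pvIsWQS (c : Char) : Bool := c == 'W' || c == 'Q' || c == 'S'

-- one iteration of A's inner 'for j in range(len(str(a)))' loop, transliterated
def fucStep (s : List Char) (acc : List (List String)) (j : Int) : List (List String) :=
  if 0 < j ∧ j < (s.length : Int) - 3 then
    if ((PySem.List.pyGet? s j).elim false PySem.Chars.isdigit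
        && (PySem.List.pyGet? s (j + 1)).elim false pvIsFN
        && (PySem.List.pyGet? s (j + 2)).elim false pvIsWQS) then
      acc ++ [[String.ofList (PySem.List.slice s none (some (j + 1))),
               String.ofList (PySem.List.slice s none (some (PySem.Chars.findFrom s ['_'] 2 none))
                          ++ ['|'] ++ PySem.List.slice s none (some (j + 1)) ++ ['|'] ++ s)]]
    else acc
  else acc

def fuc (iterator : List String) : List (List String) :=
  iterator.foldl (fun acc a =>
    (PySem.List.pyRange 0 (a.toList.length : Int) 1).foldl (fucStep a.toList) acc) []

-- ===== PORT B =====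
-- B's while-loop scanner: emit position p of each [FN][WQS] occurrence, advancing 2 past a hit
def pvScan (s : List Char) (p : Nat) : List Nat :=
  match s with
  | c1 :: c2 :: rest =>
    if pvIsFN c1 && pvIsWQS c2 then p :: pvScan rest (p + 2) else pvScan (c2 :: rest) (p + 1)
  | _ => []
termination_by s.length
decreasing_by all_goals (simp only [List.length_cons]; omega)

-- B's record builder at match position p (idx2 = s.find('_', 2), precomputed per string)
def pvEmit (s : List Char) (idx2 : Int) (p : Nat) : Option (List String) :=
  if decide (2 ≤ p) && decide (p + 3 ≤ s.length) && PySem.Chars.isdigit (s.getD (p - 1) ' ') then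
    some [String.ofList (s.take p),
          String.ofList (PySem.List.slice s none (some idx2) ++ '|' :: (s.take p ++ '|' :: s))]
  else none

def fuc_alt (iterator : List String) : List (List String) :=
  iterator.flatMap (fun a =>
    (pvScan a.toList 0).filterMap (pvEmit a.toList (PySem.Chars.findFrom a.toList ['_'] 2 none)))

-- ===== PRECONDITION & SPEC =====
def Spec_fuc (iterator : List String) (out : List (List String)) : Prop := out = fuc_alt iterator
instance (iterator : List String) (out : List (List String)) : Decidable (Spec_fuc iterator out) := by unfold Spec_fuc; infer_instance

-- ===== CLAIM (what is proved, stated in full; the proofs are below) =====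
def Claim_equal_fuc : Prop := ∀ (iterator : List String), Dom_fuc iterator → Spec_fuc iterator (fuc iterator)

-- ===== LEMMAS AND PROOFS =====

-- combined hit test / record of A, in Bool form
def pvHit (s : List Char) (j : Int) : Bool :=
  decide (0 < j) && decide (j < (s.length : Int) - 3)
  && (PySem.List.pyGet? s j).elim false PySem.Chars.isdigit
  && (PySem.List.pyGet? s (j + 1)).elim false pvIsFN
  && (PySem.List.pyGet? s (j + 2)).elim false pvIsWQS

def pvRecA (s : List Char) (j : Int) : List String :=
  [String.ofList (PySem.List.slice s none (some (j + 1))),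
   String.ofList (PySem.List.slice s none (some (PySem.Chars.findFrom s ['_'] 2 none))
              ++ ['|'] ++ PySem.List.slice s none (some (j + 1)) ++ ['|'] ++ s)]

theorem fucStep_eq (s : List Char) (acc : List (List String)) (j : Int) :
    fucStep s acc j = if pvHit s j then acc ++ [pvRecA s j] else acc := by
  unfold fucStep pvHit pvRecA
  by_cases h1 : 0 < j ∧ j < (s.length : Int) - 3
  · rw [if_pos h1, show decide (0 < j) = true by simp [h1.1],
      show decide (j < (s.length : Int) - 3) = true by simp [h1.2]]
    simp only [Bool.true_and]
  · rw [if_neg h1]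
    have hd : (decide (0 < j) && decide (j < (s.length : Int) - 3)) = false := by
      rw [← Bool.decide_and]; exact decide_eq_false h1
    simp [hd]

-- match predicate at a position (the two suffix characters)
def pvMatch (s : List Char) (p : Nat) : Bool :=
  (s[p]?.elim false pvIsFN) && (s[p + 1]?.elim false pvIsWQS)

-- one-step version of the scanner
def pvMatches : List Char → Nat → List Nat
  | c :: t, q => (if pvIsFN c && (t.head?.elim false pvIsWQS) then [q] else []) ++ pvMatches t (q + 1)
  | [], _ => []

theorem pvIsFN_of_WQS (c : Char) (h : pvIsWQS c = true) : pvIsFN c = false := by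
  simp only [pvIsWQS, Bool.or_eq_true, beq_iff_eq] at h
  rcases h with (h | h) | h <;> subst h <;> decide

theorem pvScan_eq_matches (s : List Char) (q : Nat) : pvScan s q = pvMatches s q := by
  fun_induction pvScan s q with
  | case1 q c1 c2 rest h ih =>
    rcases Bool.and_eq_true .. |>.mp h with ⟨hf, hw⟩
    simp [pvMatches, hf, hw, pvIsFN_of_WQS _ hw, ih]
  | case2 q c1 c2 rest h ih =>
    rw [ih]
    conv_rhs => rw [pvMatches]
    rw [if_neg (by simpa using h)]
    simp
  | case3 s q h1 =>
    match s with
    | [] => simp [pvMatches]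
    | [c] => simp [pvMatches]
    | c1 :: c2 :: rest => exact absurd rfl (h1 c1 c2 rest)

theorem pvMatch_cons_succ (c : Char) (t : List Char) (k : Nat) :
    pvMatch (c :: t) (k + 1) = pvMatch t k := by
  simp [pvMatch]

theorem pvMatches_eq (s : List Char) (q : Nat) :
    pvMatches s q = ((List.range s.length).filter (fun k => pvMatch s k)).map (· + q) := by
  induction s generalizing q with
  | nil => simp [pvMatches]
  | cons c t ih =>
    rw [pvMatches, ih]
    simp only [List.length_cons, List.range_succ_eq_map, List.filter_cons, List.filter_map,
      Function.comp_def, pvMatch_cons_succ]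
    have h0 : pvMatch (c :: t) 0 = (pvIsFN c && (t.head?.elim false pvIsWQS)) := by
      simp [pvMatch, List.head?_eq_getElem?]
    rw [h0]
    by_cases hc : (pvIsFN c && (t.head?.elim false pvIsWQS)) = true <;>
      · simp only [hc, if_true, if_false, Bool.false_eq_true, List.map_cons, List.map_map,
          Function.comp_def, List.nil_append, List.cons_append, Nat.zero_add]
        first
        | (refine List.map_congr_left fun k _ => by omega)
        | (refine congrArg₂ _ rfl (List.map_congr_left fun k _ => by omega))

theorem pvGetCast (s : List Char) (j k : Nat) : PySem.List.pyGet? s ((j : Int) + (k : Int)) = s[j + k]? := by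
  push_cast [← PySem.List.pyGet?_natCast]; rfl

theorem pvKey (s : List Char) (j : Nat) :
    (if pvHit s (j : Int) then some (pvRecA s (j : Int)) else none)
    = (if pvMatch s (j + 1) then pvEmit s (PySem.Chars.findFrom s ['_'] 2 none) (j + 1) else none) := by
  unfold pvHit pvRecA pvMatch pvEmit
  rw [show ((j : Int) + 1) = ((j : Int) + ((1 : Nat) : Int)) by norm_num,
    show ((j : Int) + 2) = ((j : Int) + ((2 : Nat) : Int)) by norm_num,
    pvGetCast, pvGetCast, PySem.List.pyGet?_natCast,
    show decide (0 < (j : Int)) = decide (2 ≤ j + 1) from decide_eq_decide.mpr (by omega),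
    show decide ((j : Int) < (s.length : Int) - 3) = decide (j + 1 + 3 ≤ s.length) from
      decide_eq_decide.mpr (by omega),
    show s[j]?.elim false PySem.Chars.isdigit = PySem.Chars.isdigit (s.getD (j + 1 - 1) ' ') by
      rw [List.getD_eq_getElem?_getD, Nat.add_sub_cancel]
      cases s[j]? <;> rfl,
    show PySem.List.slice s none (some ((j : Int) + ((1:Nat) : Int))) = s.take (j + 1) by
      rw [show ((j : Int) + ((1:Nat) : Int)) = (((j + 1 : Nat)) : Int) by push_cast; ring,
        PySem.List.slice_to s (by positivity)]
      norm_num]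
  rw [show j + 1 + 1 = j + 2 from rfl]
  cases hfn : s[j + 1]?.elim false pvIsFN <;>
    cases hwqs : s[j + 2]?.elim false pvIsWQS <;>
      cases hd1 : decide (2 ≤ j + 1) <;>
        cases hd2 : decide (j + 1 + 3 ≤ s.length) <;>
          cases hdg : PySem.Chars.isdigit (s.getD (j + 1 - 1) ' ') <;> simp

theorem pvShift {α : Type} (n : Nat) (F : Nat → Option α) (h0 : F 0 = none) (hn : F n = none) :
    (List.range n).filterMap (fun j => F (j + 1)) = (List.range n).filterMap F := by
  have h1 : (List.range n).filterMap (fun j => F (j + 1))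
      = ((List.range n).map Nat.succ).filterMap F := by
    rw [List.filterMap_map]; rfl
  have h2 : (List.range (n + 1)).filterMap F = ((List.range n).map Nat.succ).filterMap F := by
    rw [List.range_succ_eq_map]; simp [h0]
  have h3 : (List.range (n + 1)).filterMap F = (List.range n).filterMap F := by
    rw [List.range_succ]; simp [hn]
  rw [h1, ← h2, h3]

theorem pvMapFilter {α β : Type} (l : List α) (p : α → Bool) (f : α → β) :
    (l.filter p).map f = l.filterMap (fun x => if p x then some (f x) else none) := by
  induction l with
  | nil => rfl
  | cons a t ih => by_cases h : p a <;> simp [h, ih]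

theorem pvInner_eq (s : List Char) (acc : List (List String)) :
    (PySem.List.pyRange 0 (s.length : Int) 1).foldl (fucStep s) acc
    = acc ++ (pvScan s 0).filterMap (pvEmit s (PySem.Chars.findFrom s ['_'] 2 none)) := by
  have hstep : fucStep s = fun a j => if pvHit s j then a ++ [pvRecA s j] else a :=
    funext fun a => funext fun j => fucStep_eq s a j
  rw [hstep, PySem.List.foldl_append_if, pvScan_eq_matches, pvMatches_eq, PySem.List.pyRange_one,
    show (((s.length : Int) - 0).toNat) = s.length by omega,
    show ((List.range s.length).filter (fun k => pvMatch s k)).map (· + 0)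
      = (List.range s.length).filter (fun k => pvMatch s k) by simp,
    List.filter_map, List.map_map, pvMapFilter, List.filterMap_filter]
  congr 1
  rw [show (fun k : Nat => if (pvHit s ∘ fun k : Nat => (0 : Int) + ↑k) k = true
        then some ((pvRecA s ∘ fun k : Nat => (0 : Int) + ↑k) k) else none)
      = fun k : Nat => if pvHit s (k : Int) then some (pvRecA s (k : Int)) else none by
    funext k; simp]
  rw [show (fun k : Nat => if pvHit s (k : Int) then some (pvRecA s (k : Int)) else none)
      = fun k : Nat => (fun p => if pvMatch s p
          then pvEmit s (PySem.Chars.findFrom s ['_'] 2 none) p else none) (k + 1) from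
    funext (pvKey s)]
  refine pvShift s.length
    (fun p => if pvMatch s p = true then pvEmit s (PySem.Chars.findFrom s ['_'] 2 none) p else none)
    ?_ ?_
  · show (if pvMatch s 0 then pvEmit s (PySem.Chars.findFrom s ['_'] 2 none) 0 else none) = none
    cases h : pvMatch s 0 <;> simp [pvEmit]
  · show (if pvMatch s s.length
        then pvEmit s (PySem.Chars.findFrom s ['_'] 2 none) s.length else none) = none
    have hm : pvMatch s s.length = false := by
      simp [pvMatch]
    simp [hm]

-- ===== VERDICT (by name: the statement is the Claim_ definition above) =====
theorem fuc_spec : Claim_equal_fuc := by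
  intro iterator _
  unfold Spec_fuc fuc fuc_alt
  have : (fun (acc : List (List String)) (a : String) =>
      (PySem.List.pyRange 0 (a.toList.length : Int) 1).foldl (fucStep a.toList) acc)
      = fun acc a => acc ++ (pvScan a.toList 0).filterMap (pvEmit a.toList (PySem.Chars.findFrom a.toList ['_'] 2 none)) := by
    funext acc a; exact pvInner_eq a.toList acc
  rw [this, PySem.List.foldl_append_eq_flatMap]
  simp
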